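-- pv_equiv track=rewrite | github.com/hirofumi0810/neural_sp | neural_sp/datasets/utils.py | _set_batch_size_bin
-- ===== SOURCE A (Python) =====
-- def _set_batch_size_bin(max_n_bins, lengths, num_replicas):
--     total_bin = 0
--     batch_size = 0
--     for length in lengths:
--         if length > max_n_bins:
--             raise ValueError(f"max_n_bins is too small: {max_n_bins}")
--         if total_bin + length <= max_n_bins:
--             total_bin += length
--             batch_size += 1
--         else:
--             break
--
--     batch_size = batch_size // num_replicas * num_replicas
--     batch_size = max(num_replicas, batch_size)
--     # NOTE: ensure batch size>=1 for all replicas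
--     return batch_size
-- ===== SOURCE B (Python) =====
-- def _set_batch_size_bin(max_n_bins, lengths, num_replicas):
--     # Prefix-sum table built once, then a cutoff over the table, then one
--     # separate validity scan over the examined prefix of lengths.
--     prefix = []
--     s = 0
--     for l in lengths:
--         s += l
--         prefix.append(s)
--     k = 0
--     while k < len(prefix) and prefix[k] <= max_n_bins:
--         k += 1
--     if any(l > max_n_bins for l in lengths[:k + 1]):
--         raise ValueError(f"max_n_bins is too small: {max_n_bins}")
--     return max(num_replicas, k // num_replicas * num_replicas)
-- ===== Notes on version B (the rewrite author's own statement) =====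
-- stated objective: alternative
-- what changed: Replaces A's fused running-sum loop with break/raise by three separate passes: build the prefix-sum table once, find the cutoff index over that table, then one standalone validity scan over the examined slice; the rounding is a single expression.
import Mathlib
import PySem

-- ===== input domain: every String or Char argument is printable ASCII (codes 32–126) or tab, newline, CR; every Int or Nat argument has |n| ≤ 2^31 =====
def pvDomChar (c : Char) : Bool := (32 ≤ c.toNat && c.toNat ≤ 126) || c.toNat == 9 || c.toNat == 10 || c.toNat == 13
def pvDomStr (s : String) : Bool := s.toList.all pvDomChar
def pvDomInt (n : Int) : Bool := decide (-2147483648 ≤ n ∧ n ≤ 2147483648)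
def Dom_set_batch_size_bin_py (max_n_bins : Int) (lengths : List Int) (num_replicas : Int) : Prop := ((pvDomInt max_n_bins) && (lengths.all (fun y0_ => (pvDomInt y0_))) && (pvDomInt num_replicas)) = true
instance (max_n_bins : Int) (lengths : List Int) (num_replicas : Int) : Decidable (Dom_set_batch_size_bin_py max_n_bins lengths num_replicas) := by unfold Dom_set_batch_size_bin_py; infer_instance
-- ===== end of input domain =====

-- B rebuilds the result from a prefix-sum table, a cutoff over it, and one separate
-- validity scan (alternative decomposition, same O(n) cost); Pre_ excludes the
-- inputs where A raises (ValueError on an oversized reached length, ZeroDivisionError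
-- on num_replicas = 0).


-- ===== PORT A =====
-- A's for-loop over lengths with state (total_bin, batch_size); none = ValueError raised.
def pvALoop (max_n_bins : Int) : List Int → Int → Int → Option (Int × Int)
  | [], total_bin, batch_size => some (total_bin, batch_size)
  | length :: rest, total_bin, batch_size =>
    if length > max_n_bins then none
    else if total_bin + length ≤ max_n_bins then
      pvALoop max_n_bins rest (total_bin + length) (batch_size + 1)
    else some (total_bin, batch_size)

def set_batch_size_bin_py (max_n_bins : Int) (lengths : List Int) (num_replicas : Int) : Int :=
  match pvALoop max_n_bins lengths 0 0 with
  | none => 0  -- unreachable under Pre_ (A raises ValueError)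
  | some (_, batch_size) =>
      max num_replicas (PySem.Int.floordiv batch_size num_replicas * num_replicas)

-- ===== PORT B =====
-- B's first pass: the prefix-sum table (Python: s += l; prefix.append(s)).
def pvPrefixSums : List Int → Int → List Int
  | [], _ => []
  | l :: rest, s => (s + l) :: pvPrefixSums rest (s + l)

-- B's while loop: count leading prefixes within capacity.
def pvCutoff (max_n_bins : Int) : List Int → Nat
  | [] => 0
  | p :: rest => if p ≤ max_n_bins then pvCutoff max_n_bins rest + 1 else 0

def set_batch_size_bin_py_alt (max_n_bins : Int) (lengths : List Int) (num_replicas : Int) : Int :=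
  let prefixSums := pvPrefixSums lengths 0
  let k := pvCutoff max_n_bins prefixSums
  -- lengths[:k+1] with k+1 ≥ 1: exactly List.take (k+1)
  if (lengths.take (k + 1)).any (fun l => decide (l > max_n_bins)) then 0  -- unreachable under Pre_ (B raises ValueError)
  else max num_replicas (PySem.Int.floordiv (k : Int) num_replicas * num_replicas)

-- ===== PRECONDITION & SPEC =====
-- Pre_ excludes exactly the inputs where A (and B) raise: num_replicas = 0
-- (ZeroDivisionError) and lists whose scan reaches an element > max_n_bins (ValueError);
-- an element is reached while every earlier prefix sum fits into max_n_bins.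
def Pre_set_batch_size_bin_py (max_n_bins : Int) (lengths : List Int) (num_replicas : Int) : Prop :=
  num_replicas ≠ 0 ∧
  ∀ i < lengths.length, (∀ j < i, (lengths.take (j + 1)).sum ≤ max_n_bins) →
    lengths.getD i 0 ≤ max_n_bins
instance (max_n_bins : Int) (lengths : List Int) (num_replicas : Int) : Decidable (Pre_set_batch_size_bin_py max_n_bins lengths num_replicas) := by unfold Pre_set_batch_size_bin_py; infer_instance

def pvWitness_set_batch_size_bin_py : Int × List Int × Int := (10, [3, 4, 2, 5], 2)

def Spec_set_batch_size_bin_py (max_n_bins : Int) (lengths : List Int) (num_replicas : Int) (out : Int) : Prop := out = set_batch_size_bin_py_alt max_n_bins lengths num_replicas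
instance (max_n_bins : Int) (lengths : List Int) (num_replicas : Int) (out : Int) : Decidable (Spec_set_batch_size_bin_py max_n_bins lengths num_replicas out) := by unfold Spec_set_batch_size_bin_py; infer_instance

-- ===== CLAIM (what is proved, stated in full; the proofs are below) =====
def Claim_equal_set_batch_size_bin_py : Prop := ∀ (max_n_bins : Int) (lengths : List Int) (num_replicas : Int), Dom_set_batch_size_bin_py max_n_bins lengths num_replicas → Pre_set_batch_size_bin_py max_n_bins lengths num_replicas → Spec_set_batch_size_bin_py max_n_bins lengths num_replicas (set_batch_size_bin_py max_n_bins lengths num_replicas)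

-- ===== LEMMAS AND PROOFS =====

-- Core invariant: if no reached element exceeds capacity (relative to accumulator s),
-- A's loop returns bs + cutoff, and every element of the examined slice is ≤ capacity.
theorem pv_main (m : Int) : ∀ (L : List Int) (s bs : Int),
    (∀ i < L.length, (∀ j < i, s + (L.take (j + 1)).sum ≤ m) → L.getD i 0 ≤ m) →
    ((L.take (pvCutoff m (pvPrefixSums L s) + 1)).all (fun l => decide (l ≤ m)) = true ∧
      ∃ t, pvALoop m L s bs = some (t, bs + (pvCutoff m (pvPrefixSums L s) : Int))) := by
  intro L
  induction L with
  | nil =>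
    intro s bs _
    refine ⟨by simp [pvPrefixSums, pvCutoff], ⟨s, ?_⟩⟩
    simp [pvALoop, pvPrefixSums, pvCutoff]
  | cons l rest ih =>
    intro s bs h
    have hl : l ≤ m := by
      have := h 0 (by simp) (by intro j hj; omega)
      simpa using this
    by_cases hfit : s + l ≤ m
    · have hrest : ∀ i < rest.length,
          (∀ j < i, (s + l) + (rest.take (j + 1)).sum ≤ m) → rest.getD i 0 ≤ m := by
        intro i hi hpre
        have := h (i + 1) (by simpa using Nat.succ_lt_succ hi) ?_
        · simpa using this
        · intro j hj
          cases j with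
          | zero => simpa using hfit
          | succ j' =>
            have h2 := hpre j' (by omega)
            rw [List.take_succ_cons, List.sum_cons]
            linarith
      obtain ⟨hall, t, hloop⟩ := ih (s + l) (bs + 1) hrest
      refine ⟨?_, ⟨t, ?_⟩⟩
      · simp only [pvPrefixSums, pvCutoff, if_pos hfit]
        simpa [List.take_succ_cons, List.all_cons, hl] using hall
      · simp only [pvPrefixSums, pvCutoff, pvALoop,
          if_neg (not_lt.mpr hl), if_pos hfit]
        rw [hloop]
        congr 2
        push_cast
        ring
    · refine ⟨?_, ⟨s, ?_⟩⟩
      · simp [pvPrefixSums, pvCutoff, if_neg hfit, List.take_succ_cons, hl]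
      · simp [pvPrefixSums, pvCutoff, if_neg hfit, pvALoop, not_lt.mpr hl]

-- ===== VERDICT (by name: the statement is the Claim_ definition above) =====
theorem set_batch_size_bin_py_spec : Claim_equal_set_batch_size_bin_py := by
  intro m L r _ hpre
  obtain ⟨_, hnr⟩ := hpre
  have h : ∀ i < L.length, (∀ j < i, (0 : Int) + (L.take (j + 1)).sum ≤ m) → L.getD i 0 ≤ m := by
    intro i hi hpre'
    exact hnr i hi (by intro j hj; have := hpre' j hj; omega)
  obtain ⟨hall, t, hloop⟩ := pv_main m L 0 0 h
  have hany : (L.take (pvCutoff m (pvPrefixSums L 0) + 1)).any (fun l => decide (l > m)) = false := by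
    rw [List.any_eq_false]
    intro x hx
    have := (List.all_eq_true.mp hall) x hx
    simpa using this
  unfold Spec_set_batch_size_bin_py set_batch_size_bin_py set_batch_size_bin_py_alt
  rw [hloop]
  simp only [hany, if_false, Bool.false_eq_true]
  norm_num
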